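-- pv_equiv track=rewrite | github.com/DeepRank/3D-Vac | src/0_seq_data_analysis/cluster_peptides.py | split_in_indexed_batches
-- ===== SOURCE A (Python) =====
-- from math import ceil
--
-- def split_in_indexed_batches(samples, n_jobs):
--     samples = [(i, x) for i,x in enumerate(samples)]
--     batches = []
--     step = ceil(len(samples)/n_jobs)
--     end = 0
--     for job in range(n_jobs):
--         start = end
--         end = start + step
--         batches.append(samples[start:end])
--
--     return batches
-- ===== SOURCE B (Python) =====
-- from math import ceil
--
-- def split_in_indexed_batches(samples, n_jobs):
--     step = ceil(len(samples) / n_jobs)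
--     batches = [[] for _ in range(n_jobs)]
--     if n_jobs > 0 and samples:
--         for i, x in enumerate(samples):
--             batches[i // step].append((i, x))
--     return batches
-- ===== Notes on version B (the rewrite author's own statement) =====
-- stated objective: alternative
-- what changed: Instead of slicing the enumerated list once per job with running start/end indices, B preallocates the n_jobs buckets and makes a single pass over enumerate(samples), scattering each (i, x) into bucket i // step.
import Mathlib
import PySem

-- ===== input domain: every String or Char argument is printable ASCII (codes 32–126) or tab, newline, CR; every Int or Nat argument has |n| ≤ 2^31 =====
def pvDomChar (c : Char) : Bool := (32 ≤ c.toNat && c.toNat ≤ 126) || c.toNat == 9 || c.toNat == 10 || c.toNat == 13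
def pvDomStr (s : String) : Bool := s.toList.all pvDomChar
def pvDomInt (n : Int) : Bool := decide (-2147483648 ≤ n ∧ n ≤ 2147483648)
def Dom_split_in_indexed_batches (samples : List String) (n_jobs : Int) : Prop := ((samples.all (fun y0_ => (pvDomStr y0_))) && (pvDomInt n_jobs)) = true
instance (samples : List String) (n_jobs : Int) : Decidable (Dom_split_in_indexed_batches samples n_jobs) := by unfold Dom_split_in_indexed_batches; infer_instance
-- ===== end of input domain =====

-- B scatters each enumerated sample into a preallocated bucket i // step in one pass,
-- instead of A's per-job slicing with running start/end indices (objective: alternative decomposition).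

-- ===== PORT A =====
-- math.ceil(len(samples)/n_jobs) is ported as exact ceiling division -((-len) // n_jobs);
-- exact on Dom (lengths far below 2^52, so the float true division rounds to the same ceiling).
def split_in_indexed_batches (samples : List String) (n_jobs : Int) : List (List (Int × String)) :=
  let samples' := PySem.List.enumerate samples 0
  let step : Int := -(PySem.Int.floordiv (-(samples'.length : Int)) n_jobs)
  let r := (PySem.List.pyRange 0 n_jobs 1).foldl
    (fun (st : Int × List (List (Int × String))) (_job : Int) =>
      let start := st.1
      let e := start + step
      (e, st.2 ++ [PySem.List.slice samples' (some start) (some e)]))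
    (0, [])
  r.2

-- ===== PORT B =====
def split_in_indexed_batches_alt (samples : List String) (n_jobs : Int) : List (List (Int × String)) :=
  let step : Int := -(PySem.Int.floordiv (-(samples.length : Int)) n_jobs)
  let batches : List (List (Int × String)) := List.replicate n_jobs.toNat []
  if 0 < n_jobs ∧ samples ≠ [] then
    (PySem.List.enumerate samples 0).foldl
      (fun bs p => bs.modify (PySem.Int.floordiv p.1 step).toNat (fun b => b ++ [p])) batches
  else batches

-- ===== PRECONDITION & SPEC =====
-- Pre_ excludes exactly n_jobs = 0, where A (and B) raise ZeroDivisionError computing ceil(len/n_jobs).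
def Pre_split_in_indexed_batches (samples : List String) (n_jobs : Int) : Prop := n_jobs ≠ 0
instance (samples : List String) (n_jobs : Int) : Decidable (Pre_split_in_indexed_batches samples n_jobs) := by unfold Pre_split_in_indexed_batches; infer_instance
def pvWitness_split_in_indexed_batches : List String × Int := (["a", "b", "c"], 2)

def Spec_split_in_indexed_batches (samples : List String) (n_jobs : Int) (out : List (List (Int × String))) : Prop := out = split_in_indexed_batches_alt samples n_jobs
instance (samples : List String) (n_jobs : Int) (out : List (List (Int × String))) : Decidable (Spec_split_in_indexed_batches samples n_jobs out) := by unfold Spec_split_in_indexed_batches; infer_instance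

-- ===== CLAIM (what is proved, stated in full; the proofs are below) =====
def Claim_equal_split_in_indexed_batches : Prop := ∀ (samples : List String) (n_jobs : Int), Dom_split_in_indexed_batches samples n_jobs → Pre_split_in_indexed_batches samples n_jobs → Spec_split_in_indexed_batches samples n_jobs (split_in_indexed_batches samples n_jobs)

-- ===== LEMMAS AND PROOFS =====

theorem pv_enum_length (xs : List String) (a : Int) :
    (PySem.List.enumerate xs a).length = xs.length := by
  induction xs generalizing a with
  | nil => simp [PySem.List.enumerate_nil]
  | cons x t ih => simp [PySem.List.enumerate_cons, ih]

theorem pv_enum_fst (xs : List String) (a : Int) (k : Nat)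
    (h : k < (PySem.List.enumerate xs a).length) :
    ((PySem.List.enumerate xs a)[k]).1 = a + k := by
  induction xs generalizing a k with
  | nil => simp [PySem.List.enumerate_nil] at h
  | cons x t ih =>
    cases k with
    | zero => simp [PySem.List.enumerate_cons]
    | succ k =>
      simp only [PySem.List.enumerate_cons, List.getElem_cons_succ]
      rw [ih (a + 1) k (by simp [PySem.List.enumerate_cons] at h ⊢; omega)]
      push_cast; ring

theorem pv_A_fold (es : List (Int × String)) (step : Int) :
    ∀ (K c : Nat) (acc : List (List (Int × String))),
    (List.range K).foldl
      (fun (st : Int × List (List (Int × String))) (_ : Nat) =>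
        (st.1 + step, st.2 ++ [PySem.List.slice es (some st.1) (some (st.1 + step))]))
      ((c : Int) * step, acc)
    = (((c + K : Nat) : Int) * step,
       acc ++ (List.range K).map
         (fun j => PySem.List.slice es (some (((c + j : Nat) : Int) * step))
                                      (some (((c + j + 1 : Nat) : Int) * step)))) := by
  intro K
  induction K with
  | zero => intro c acc; simp
  | succ K ih =>
    intro c acc
    rw [List.range_succ, List.foldl_append, ih]
    simp only [List.foldl_cons, List.foldl_nil, List.map_append, List.map_cons, List.map_nil,
      Prod.mk.injEq]
    refine ⟨by push_cast; ring, ?_⟩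
    rw [List.append_assoc]
    congr 3
    push_cast; ring_nf

theorem pv_scatter (es : List (Int × String)) (s : Nat) (hs : 0 < s) (K : Nat)
    (hidx : ∀ k (h : k < es.length), (es[k]).1 = (k : Int)) :
    es.foldl
      (fun bs p => bs.modify (PySem.Int.floordiv p.1 (s : Int)).toNat (fun b => b ++ [p]))
      (List.replicate K [])
    = (List.range K).map (fun j => (es.drop (j * s)).take s) := by
  have key : ∀ t, t ≤ es.length →
      (es.take t).foldl
        (fun bs p => bs.modify (PySem.Int.floordiv p.1 (s : Int)).toNat (fun b => b ++ [p]))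
        (List.replicate K [])
      = (List.range K).map (fun j => (es.drop (j * s)).take (min s (t - j * s))) := by
    intro t
    induction t with
    | zero =>
      intro _
      have : ∀ j, j ∈ List.range K → (es.drop (j * s)).take (min s (0 - j * s)) = [] := by
        intro j _; simp
      rw [List.map_congr_left this]
      simp [List.map_const']
    | succ t ih =>
      intro ht
      have htl : t < es.length := by omega
      have htake : es.take (t + 1) = es.take t ++ [es[t]] := by
        rw [List.take_add_one, List.getElem?_eq_getElem htl]; rfl
      rw [htake, List.foldl_append, ih (by omega)]
      simp only [List.foldl_cons, List.foldl_nil]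
      have hfst : (es[t]).1 = (t : Int) := hidx t htl
      have hfd : (PySem.Int.floordiv ((es[t]).1) (s : Int)).toNat = t / s := by
        rw [hfst, PySem.Int.floordiv_natCast]
        exact Int.toNat_natCast _
      set q := t / s with hqdef
      have hq1 : q * s ≤ t := by rw [hqdef]; exact Nat.div_mul_le_self t s
      have hq2 : t < q * s + s := by
        have h1 : s * q + t % s = t := Nat.div_add_mod t s
        have h2 : t % s < s := Nat.mod_lt t hs
        have h3 : q * s = s * q := mul_comm q s
        omega
      apply List.ext_getElem
      · simp
      · intro j hj1 hj2
        simp only [List.length_modify, List.length_map, List.length_range] at hj1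
        rw [List.getElem_modify]
        simp only [List.getElem_map, List.getElem_range, hfd]
        by_cases hje : q = j
        · subst hje
          rw [if_pos rfl]
          have hd1 : min s (t - q * s) = t - q * s := by omega
          have hd2 : min s (t + 1 - q * s) = (t - q * s) + 1 := by omega
          have hlt : t - q * s < (es.drop (q * s)).length := by
            rw [List.length_drop]; omega
          have hsum : q * s + (t - q * s) = t := by omega
          have hel : (es.drop (q * s))[t - q * s]'hlt = es[t] := by
            simp only [List.getElem_drop, hsum]
          rw [hd1, hd2, List.take_add_one, List.getElem?_eq_getElem hlt, hel]
          rfl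
        · rw [if_neg hje]
          congr 1
          rcases lt_or_gt_of_ne hje with h | h
          · have : (q + 1) * s ≤ j * s := Nat.mul_le_mul_right s (by omega)
            rw [Nat.succ_mul] at this
            omega
          · have : (j + 1) * s ≤ q * s := Nat.mul_le_mul_right s (by omega)
            rw [Nat.succ_mul] at this
            omega
  have := key es.length le_rfl
  rw [List.take_length] at this
  rw [this]
  apply List.map_congr_left
  intro j _
  rw [List.take_eq_take_iff]
  simp only [List.length_drop]
  omega

theorem pv_main (samples : List String) (n_jobs : Int) (hpre : n_jobs ≠ 0) :
    split_in_indexed_batches samples n_jobs = split_in_indexed_batches_alt samples n_jobs := by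
  rcases lt_trichotomy n_jobs 0 with hn | hn | hn
  · -- negative: both empty
    simp only [split_in_indexed_batches, split_in_indexed_batches_alt]
    rw [PySem.List.pyRange_one_eq_nil (by omega)]
    rw [if_neg (by simp; intro h; omega)]
    simp [Int.toNat_of_nonpos (le_of_lt hn)]
  · exact absurd hn hpre
  · -- positive
    set m : Nat := samples.length with hm
    set es := PySem.List.enumerate samples 0 with hes
    set step : Int := -(PySem.Int.floordiv (-(m : Int)) n_jobs) with hstepdef
    -- step facts
    have hfd : PySem.Int.floordiv (-(m : Int)) n_jobs = (-(m : Int)) / n_jobs :=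
      PySem.Int.floordiv_eq_ediv_of_pos hn
    have hdm := Int.mul_ediv_add_emod (-(m : Int)) n_jobs
    have hr1 : 0 ≤ (-(m : Int)) % n_jobs := Int.emod_nonneg _ (by omega)
    have hr2 : (-(m : Int)) % n_jobs < n_jobs := Int.emod_lt_of_pos _ hn
    have hmle : (m : Int) ≤ step * n_jobs := by
      rw [hstepdef, hfd]
      nlinarith [hdm, hr1, hr2]
    have hstep0 : 0 ≤ step := by
      by_cases h : 0 ≤ step
      · exact h
      · exfalso
        have : step * n_jobs ≤ -1 * n_jobs :=
          mul_le_mul_of_nonneg_right (by omega) (le_of_lt hn)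
        have hm0 : (0 : Int) ≤ (m : Int) := by positivity
        omega
    set s : Nat := step.toNat with hsdef
    have hscast : (s : Int) = step := Int.toNat_of_nonneg hstep0
    set K : Nat := n_jobs.toNat with hKdef
    have hKcast : (K : Int) = n_jobs := Int.toNat_of_nonneg (le_of_lt hn)
    have hmKs : m ≤ K * s := by
      have : (m : Int) ≤ (K : Int) * (s : Int) := by rw [hscast, hKcast]; linarith [hmle]
      exact_mod_cast this
    have henl : es.length = m := by rw [hes, pv_enum_length, hm]
    -- A characterization
    have hA : split_in_indexed_batches samples n_jobs
        = (List.range K).map (fun j => (es.drop (j * s)).take s) := by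
      show ((PySem.List.pyRange 0 n_jobs 1).foldl
        (fun (st : Int × List (List (Int × String))) (_job : Int) =>
          (st.1 + (-(PySem.Int.floordiv (-((PySem.List.enumerate samples 0).length : Int)) n_jobs)),
           st.2 ++ [PySem.List.slice (PySem.List.enumerate samples 0) (some st.1)
             (some (st.1 + (-(PySem.Int.floordiv (-((PySem.List.enumerate samples 0).length : Int)) n_jobs))))]))
        (0, [])).2 = _
      rw [pv_enum_length]
      rw [PySem.List.pyRange_one]
      rw [List.foldl_map]
      have h0 : (0 : Int) = ((0 : Nat) : Int) * step := by simp
      rw [show ((0:Int), ([] : List (List (Int × String)))) = (((0:Nat):Int) * step, ([] : List (List (Int × String)))) by rw [← h0]]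
      rw [pv_A_fold (PySem.List.enumerate samples 0) step ((n_jobs - 0).toNat) 0 []]
      simp only [List.nil_append]
      have hKK : (n_jobs - 0).toNat = K := by omega
      rw [hKK]
      apply List.map_congr_left
      intro j hj
      rw [List.mem_range] at hj
      have e1 : ((0 + j : Nat) : Int) * step = (((j * s : Nat) : Int)) := by
        push_cast [← hscast]; ring
      have e2 : ((0 + j + 1 : Nat) : Int) * step = (((j * s + s : Nat) : Int)) := by
        push_cast [← hscast]; ring
      rw [e1, e2, PySem.List.slice_natCast]
      rw [← hes]
      congr 1
      omega
    rcases eq_or_ne samples [] with hnil | hnil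
    · -- empty samples: both sides are K empty batches
      subst hnil
      have hs0 : s = 0 := by
        rw [hsdef, hstepdef, hfd]; simp
      rw [hA, hs0]
      simp only [split_in_indexed_batches_alt]
      rw [if_neg (by simp)]
      simp [List.map_const', ← hKdef]
    · -- nonempty: scatter
      have hmpos : 0 < m := by
        rw [hm]; cases samples with
        | nil => exact absurd rfl hnil
        | cons a l => simp
      have hspos : 0 < s := by
        rcases Nat.eq_zero_or_pos s with h | h
        · exfalso
          rw [← hscast, h] at hmle
          simp at hmle
          omega
        · exact h
      have hB : split_in_indexed_batches_alt samples n_jobs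
          = es.foldl (fun bs p => bs.modify (PySem.Int.floordiv p.1 (s : Int)).toNat
              (fun b => b ++ [p])) (List.replicate K []) := by
        show (if 0 < n_jobs ∧ samples ≠ [] then _ else _) = _
        rw [if_pos ⟨hn, hnil⟩]
        rw [← hes, ← hKdef]
        rw [show -(PySem.Int.floordiv (-(samples.length : Int)) n_jobs) = ((s : Int)) by
          rw [← hm, ← hstepdef, hscast]]
      rw [hA, hB]
      rw [pv_scatter es s hspos K]
      intro k hk
      have h := pv_enum_fst samples 0 k (by simpa [hes] using hk)
      simpa using h

-- ===== VERDICT (by name: the statement is the Claim_ definition above) =====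
theorem split_in_indexed_batches_spec : Claim_equal_split_in_indexed_batches := by
  intro samples n_jobs _hdom hpre
  unfold Spec_split_in_indexed_batches
  exact pv_main samples n_jobs hpre
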